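-- pv_equiv track=rewrite | github.com/debdattasarkar/DSA | 2. GFG/0. All/5. Data Structure/(M) Subset XOR/py_sol.py | subsetXOR
-- ===== SOURCE A (Python) =====
-- def subsetXOR(n : int):
--     # Step 1: compute XOR of all numbers from 1 to n using n % 4 pattern
--     remainder = n % 4
--     if remainder == 0:
--         xor_1_to_n = n
--     elif remainder == 1:
--         xor_1_to_n = 1
--     elif remainder == 2:
--         xor_1_to_n = n + 1
--     else:  # remainder == 3
--         xor_1_to_n = 0
--
--     # Step 2: if XOR(1..n) == n, we can take all numbers
--     if xor_1_to_n == n: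
--         # return [1, 2, ..., n]
--         return [value for value in range(1, n + 1)]
--
--     # Step 3: otherwise, drop exactly one element x such that:
--     # XOR(1..n without x) = n
--     # x = xor_1_to_n ^ n
--     element_to_remove = xor_1_to_n ^ n
--
--     # Step 4: build the subset skipping this element
--     result_subset = []
--     for value in range(1, n + 1):
--         if value != element_to_remove:
--             result_subset.append(value)
--
--     # This subset has size n-1 and XOR exactly n.
--     # It is unique for this size, so automatically lexicographically smallest.
--     return result_subset
-- ===== SOURCE B (Python) =====
-- def subsetXOR(n : int):
--     # Compute XOR(1..n) by a single accumulation pass.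
--     xor_1_to_n = 0
--     for value in range(1, n + 1):
--         xor_1_to_n ^= value
--     # Removing x = xor_1_to_n ^ n leaves a subset with XOR n; x is 0
--     # (i.e. nothing is removed) exactly when XOR(1..n) == n already.
--     element_to_remove = xor_1_to_n ^ n
--     return [value for value in range(1, n + 1) if value != element_to_remove]
-- ===== Notes on version B (the rewrite author's own statement) =====
-- stated objective: simpler
-- what changed: B computes the running XOR of the range by a single accumulating loop instead of A's modulus-pattern closed form, and merges A's two return branches into one filtering pass: the element to remove lies outside the range exactly when the accumulated XOR already equals n.
import Mathlib
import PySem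

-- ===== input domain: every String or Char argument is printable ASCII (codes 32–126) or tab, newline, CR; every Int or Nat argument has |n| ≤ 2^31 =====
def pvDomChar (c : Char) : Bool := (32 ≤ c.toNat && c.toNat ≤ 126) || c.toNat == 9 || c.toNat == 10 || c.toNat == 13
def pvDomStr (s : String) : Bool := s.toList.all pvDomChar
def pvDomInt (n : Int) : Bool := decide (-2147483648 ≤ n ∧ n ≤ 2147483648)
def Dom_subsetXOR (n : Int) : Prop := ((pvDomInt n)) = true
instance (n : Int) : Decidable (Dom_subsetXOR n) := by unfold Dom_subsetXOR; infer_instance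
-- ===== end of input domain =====

-- B replaces A's n%4 closed form + two return branches with an accumulated XOR loop
-- and one filtering pass (objective: simpler — one uniform pass, no special case).

-- ===== PORT A =====
def subsetXOR (n : Int) : List Int :=
  let remainder := PySem.Int.mod n 4
  let xor_1_to_n : Int :=
    if remainder = 0 then n
    else if remainder = 1 then 1
    else if remainder = 2 then n + 1
    else 0
  if xor_1_to_n = n then
    PySem.List.pyRange 1 (n + 1) 1
  else
    let element_to_remove := PySem.Int.bxor xor_1_to_n n
    (PySem.List.pyRange 1 (n + 1) 1).foldl
      (fun result_subset value =>
        if value ≠ element_to_remove then result_subset ++ [value] else result_subset) []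

-- ===== PORT B =====
def subsetXOR_alt (n : Int) : List Int :=
  let xor_1_to_n := (PySem.List.pyRange 1 (n + 1) 1).foldl (fun acc value => PySem.Int.bxor acc value) 0
  let element_to_remove := PySem.Int.bxor xor_1_to_n n
  (PySem.List.pyRange 1 (n + 1) 1).filter (fun value => value ≠ element_to_remove)

-- ===== PRECONDITION & SPEC =====
def Spec_subsetXOR (n : Int) (out : List Int) : Prop := out = subsetXOR_alt n
instance (n : Int) (out : List Int) : Decidable (Spec_subsetXOR n out) := by unfold Spec_subsetXOR; infer_instance

-- ===== CLAIM (what is proved, stated in full; the proofs are below) =====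
def Claim_equal_subsetXOR : Prop := ∀ (n : Int), Dom_subsetXOR n → Spec_subsetXOR n (subsetXOR n)

-- ===== LEMMAS AND PROOFS =====

-- A's closed form for XOR(1..n), as a standalone function of n.
def xorClosed (n : Int) : Int :=
  let remainder := PySem.Int.mod n 4
  if remainder = 0 then n
  else if remainder = 1 then 1
  else if remainder = 2 then n + 1
  else 0

-- An even natural number xored with 1 is its successor.
theorem two_mul_xor_one (b : Nat) : (2 * b) ^^^ 1 = 2 * b + 1 := by
  apply Nat.eq_of_testBit_eq
  intro i
  cases i with
  | zero => simp
  | succ i => simp [Nat.testBit_succ, Nat.mul_add_div]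

theorem bxor_one_of_even (m : Int) (h0 : 0 ≤ m) (h2 : m % 2 = 0) :
    PySem.Int.bxor m 1 = m + 1 := by
  obtain ⟨a, rfl⟩ : ∃ a : Nat, m = (a : Int) := ⟨m.toNat, (Int.toNat_of_nonneg h0).symm⟩
  obtain ⟨b, rfl⟩ : ∃ b : Nat, a = 2 * b := by
    refine ⟨a / 2, ?_⟩; omega
  have := PySem.Int.bxor_natCast (2 * b) 1
  rw [show ((1:Nat):Int) = (1:Int) by norm_num] at this
  rw [this, two_mul_xor_one]
  push_cast; ring

theorem bxor_succ_of_even (m : Int) (h0 : 0 ≤ m) (h2 : m % 2 = 0) :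
    PySem.Int.bxor m (m + 1) = 1 := by
  obtain ⟨a, rfl⟩ : ∃ a : Nat, m = (a : Int) := ⟨m.toNat, (Int.toNat_of_nonneg h0).symm⟩
  obtain ⟨b, rfl⟩ : ∃ b : Nat, a = 2 * b := by
    refine ⟨a / 2, ?_⟩; omega
  have h1 : ((2 * b : Nat) : Int) + 1 = ((2 * b + 1 : Nat) : Int) := by push_cast; ring
  rw [h1, PySem.Int.bxor_natCast, ← two_mul_xor_one b, ← Nat.xor_assoc, Nat.xor_self,
    Nat.zero_xor]
  norm_num

-- The fold of B computes A's closed form for every n ≥ 0.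
theorem foldXor_eq_closed (n : Int) (h : 0 ≤ n) :
    (PySem.List.pyRange 1 (n + 1) 1).foldl (fun acc value => PySem.Int.bxor acc value) 0
      = xorClosed n := by
  obtain ⟨k, rfl⟩ : ∃ k : Nat, n = (k : Int) := ⟨n.toNat, (Int.toNat_of_nonneg h).symm⟩
  clear h
  induction k with
  | zero =>
      simp [xorClosed]
  | succ k ih =>
      have hk : (1:Int) ≤ (k:Int) + 1 := by omega
      have hstep : PySem.List.pyRange 1 (((k:Int) + 1) + 1) 1
          = PySem.List.pyRange 1 ((k:Int) + 1) 1 ++ [(k:Int) + 1] :=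
        PySem.List.pyRange_one_succ_right hk
      have hcast : ((k + 1 : Nat) : Int) = (k : Int) + 1 := by push_cast; ring
      rw [hcast, hstep, List.foldl_append, ih]
      simp only [List.foldl]
      -- case on k % 4 to evaluate both closed forms
      have h4 : (0:Int) < 4 := by norm_num
      have hm : PySem.Int.mod (k:Int) 4 = (k:Int) % 4 := PySem.Int.mod_eq_emod_of_pos h4
      have hm' : PySem.Int.mod ((k:Int) + 1) 4 = ((k:Int) + 1) % 4 := PySem.Int.mod_eq_emod_of_pos h4
      have hk0 : (0:Int) ≤ (k:Int) := Int.natCast_nonneg k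
      rcases (by omega : (k:Int) % 4 = 0 ∨ (k:Int) % 4 = 1 ∨ (k:Int) % 4 = 2 ∨ (k:Int) % 4 = 3) with h | h | h | h
      · -- closed k = k, closed (k+1) = 1 ; k even
        simp only [xorClosed, hm, hm', h, (by omega : ((k:Int) + 1) % 4 = 1)]
        norm_num
        exact bxor_succ_of_even _ hk0 (by omega)
      · -- closed k = 1, closed (k+1) = k + 2 ; k + 1 even
        simp only [xorClosed, hm, hm', h, (by omega : ((k:Int) + 1) % 4 = 2)]
        norm_num
        rw [PySem.Int.bxor_comm]
        exact bxor_one_of_even _ (by omega) (by omega)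
      · -- closed k = k + 1, closed (k+1) = 0
        simp only [xorClosed, hm, hm', h, (by omega : ((k:Int) + 1) % 4 = 3)]
        norm_num
      · -- closed k = 0, closed (k+1) = k + 1
        simp only [xorClosed, hm, hm', h, (by omega : ((k:Int) + 1) % 4 = 0)]
        norm_num
        rw [PySem.Int.bxor_comm]
        exact PySem.Int.bxor_zero _

-- A's append-fold is a filter.
theorem foldl_filter (e : Int) (xs : List Int) :
    xs.foldl (fun acc v => if v ≠ e then acc ++ [v] else acc) []
      = xs.filter (fun v => v ≠ e) := by
  have h := PySem.List.foldl_append_if (fun v : Int => decide (v ≠ e)) (fun v => v) xs []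
  simpa using h

-- ===== VERDICT (by name: the statement is the Claim_ definition above) =====
theorem subsetXOR_spec : Claim_equal_subsetXOR := by
  intro n _
  show subsetXOR n = subsetXOR_alt n
  by_cases hn : n ≤ 0
  · -- empty range on both sides
    have hnil : PySem.List.pyRange 1 (n + 1) 1 = [] :=
      PySem.List.pyRange_one_eq_nil (by omega)
    simp only [subsetXOR, subsetXOR_alt, hnil]
    split <;> simp
  · have h0 : (0:Int) ≤ n := by omega
    have hfold := foldXor_eq_closed n h0
    simp only [subsetXOR, subsetXOR_alt, hfold, xorClosed]
    by_cases hc :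
        (if PySem.Int.mod n 4 = 0 then n
         else if PySem.Int.mod n 4 = 1 then 1
         else if PySem.Int.mod n 4 = 2 then n + 1 else 0) = n
    · -- A returns the full range; B removes 0, which is not in the range
      rw [if_pos hc, hc, PySem.Int.bxor_self, eq_comm, List.filter_eq_self]
      intro v hv
      have := (PySem.List.mem_pyRange_one).mp hv
      simp; omega
    · rw [if_neg hc]
      exact foldl_filter _ _
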